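-- pv_equiv track=rewrite | github.com/grapheneaffiliate/h4-polytopic-attention | solve_b10.py | solve_6f8cd79b
-- ===== SOURCE A (Python) =====
-- def solve_6f8cd79b(grid):
--     rows, cols = len(grid), len(grid[0])
--     out = [[0]*cols for _ in range(rows)]
--     for r in range(rows):
--         for c in range(cols):
--             if r == 0 or r == rows-1 or c == 0 or c == cols-1:
--                 out[r][c] = 8
--     return out
-- ===== SOURCE B (Python) =====
-- def solve_6f8cd79b(grid):
--     rows, cols = len(grid), len(grid[0])
--     full = [8] * cols
--     mid = ([8] if cols >= 1 else []) + [0] * (cols - 2) + ([8] if cols >= 2 else [])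
--     return [list(full) if r in (0, rows - 1) else list(mid) for r in range(rows)]
-- ===== Notes on version B (the rewrite author's own statement) =====
-- stated objective: simpler
-- what changed: B builds the two row patterns (full-8 border row, 8/0.../8 middle row) once and assembles the output by row selection, instead of A's per-cell nested scan with a branch and in-place write at every cell.
-- outside the precondition, e.g. on solve_6f8cd79b([]): A raises IndexError, B raises IndexError
import Mathlib
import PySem

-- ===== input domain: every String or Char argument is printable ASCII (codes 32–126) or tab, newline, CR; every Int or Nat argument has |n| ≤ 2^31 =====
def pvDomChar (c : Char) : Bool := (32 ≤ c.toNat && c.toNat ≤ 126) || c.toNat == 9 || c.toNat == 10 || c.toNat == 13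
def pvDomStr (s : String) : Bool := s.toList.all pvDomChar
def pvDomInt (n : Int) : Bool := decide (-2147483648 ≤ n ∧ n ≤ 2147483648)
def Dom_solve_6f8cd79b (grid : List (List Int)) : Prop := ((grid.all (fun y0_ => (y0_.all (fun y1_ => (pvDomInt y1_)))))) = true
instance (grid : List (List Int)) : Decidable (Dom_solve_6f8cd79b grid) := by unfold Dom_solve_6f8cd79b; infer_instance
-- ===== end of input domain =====

-- B replaces A's per-cell nested scan with row-pattern construction; return value only, no mutation observable.

-- ===== PORT A =====
-- literal port of A: out = rows×cols zero matrix, nested loops set border cells to 8 in place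
def solve_6f8cd79b (grid : List (List Int)) : List (List Int) :=
  let rows := grid.length
  let cols := (grid.headD []).length   -- grid[0]; Pre_ excludes the empty grid where Python raises IndexError
  let out := List.replicate rows (List.replicate cols (0 : Int))
  (List.range rows).foldl (fun out r =>
    (List.range cols).foldl (fun out c =>
      if r == 0 || r == rows - 1 || c == 0 || c == cols - 1 then
        out.modify r (fun row => row.set c 8)
      else out) out) out

-- ===== PORT B =====
-- literal port of B: build the two row patterns once, assemble by row selection
def solve_6f8cd79b_alt (grid : List (List Int)) : List (List Int) :=
  let rows := grid.length
  let cols := (grid.headD []).length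
  let full := List.replicate cols (8 : Int)
  let mid := (if cols ≥ 1 then [(8 : Int)] else []) ++ List.replicate (cols - 2) (0 : Int)
             ++ (if cols ≥ 2 then [(8 : Int)] else [])
  (List.range rows).map (fun r => if r == 0 || r == rows - 1 then full else mid)

-- ===== PRECONDITION & SPEC =====
-- Pre_ excludes exactly the empty grid, on which A's grid[0] raises IndexError.
def Pre_solve_6f8cd79b (grid : List (List Int)) : Prop := grid ≠ []
instance (grid : List (List Int)) : Decidable (Pre_solve_6f8cd79b grid) := by unfold Pre_solve_6f8cd79b; infer_instance
def pvWitness_solve_6f8cd79b : List (List Int) := [[1, 2], [3, 4], [5, 6]]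

def Spec_solve_6f8cd79b (grid : List (List Int)) (out : List (List Int)) : Prop := out = solve_6f8cd79b_alt grid
instance (grid : List (List Int)) (out : List (List Int)) : Decidable (Spec_solve_6f8cd79b grid out) := by unfold Spec_solve_6f8cd79b; infer_instance

-- ===== CLAIM (what is proved, stated in full; the proofs are below) =====
def Claim_equal_solve_6f8cd79b : Prop := ∀ (grid : List (List Int)), Dom_solve_6f8cd79b grid → Pre_solve_6f8cd79b grid → Spec_solve_6f8cd79b grid (solve_6f8cd79b grid)

-- ===== LEMMAS AND PROOFS =====

-- inner loop: folding `set` over a list of column indices, pointwise characterisation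
theorem foldl_set_length (l : List Nat) (Q : Nat → Bool) (row : List Int) :
    (l.foldl (fun row c => if Q c then row.set c 8 else row) row).length = row.length := by
  induction l generalizing row with
  | nil => rfl
  | cons c t ih =>
      simp only [List.foldl_cons]
      by_cases h : Q c = true
      · simp [h, ih, List.length_set]
      · simp [h, ih]

theorem foldl_set_getElem (l : List Nat) (Q : Nat → Bool) (row : List Int)
    (i : Nat) (hi : i < row.length) :
    (l.foldl (fun row c => if Q c then row.set c 8 else row) row)[i]'(by
      rw [foldl_set_length]; exact hi)
      = if i ∈ l ∧ Q i = true then 8 else row[i] := by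
  induction l generalizing row with
  | nil => simp
  | cons c t ih =>
      simp only [List.foldl_cons]
      by_cases hq : Q c = true
      · simp only [hq, if_true]
        rw [ih (row.set c 8) (by simpa using hi), List.getElem_set]
        by_cases hic : i = c
        · subst hic
          by_cases hmem : i ∈ t <;> simp [hmem, hq]
        · have hci : ¬ c = i := fun h => hic h.symm
          rw [if_neg hci]
          by_cases hmem : i ∈ t <;> simp [hmem, hic]
      · have hq' : Q c = false := by simpa using hq
        simp only [hq', Bool.false_eq_true, if_false]
        rw [ih row hi]
        by_cases hmem : i ∈ t
        · simp [hmem]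
        · have hno : ¬ (i ∈ c :: t ∧ Q i = true) := by
            rintro ⟨hm, hQ⟩
            rcases List.mem_cons.mp hm with h | h
            · exact hq (h ▸ hQ)
            · exact hmem h
          rw [if_neg hno]
          simp [hmem]

-- outer loop: folding `modify` over distinct row indices
theorem foldl_modify_length (l : List Nat) (g : Nat → List Int → List Int) (out : List (List Int)) :
    (l.foldl (fun out r => out.modify r (g r)) out).length = out.length := by
  induction l generalizing out with
  | nil => rfl
  | cons r t ih => simp [List.foldl_cons, ih]

theorem foldl_modify_getElem (l : List Nat) (hl : l.Nodup)
    (g : Nat → List Int → List Int) (out : List (List Int))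
    (i : Nat) (hi : i < out.length) :
    (l.foldl (fun out r => out.modify r (g r)) out)[i]'(by
      rw [foldl_modify_length]; exact hi)
      = if i ∈ l then g i out[i] else out[i] := by
  induction l generalizing out with
  | nil => simp
  | cons r t ih =>
      simp only [List.foldl_cons]
      obtain ⟨hr, ht⟩ := List.nodup_cons.mp hl
      rw [ih ht (out.modify r (g r)) (by simpa using hi)]
      by_cases hir : i = r
      · subst hir
        simp [hr]
      · rw [List.getElem_modify_ne _ _ (Ne.symm hir)]
        by_cases hmem : i ∈ t <;> simp [hmem, hir]

-- modify with the identity / composition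
theorem modify_id (out : List (List Int)) (r : Nat) :
    out.modify r (fun row => row) = out := by
  apply List.ext_getElem
  · simp
  · intro i h1 h2
    rw [List.getElem_modify]
    split <;> rfl

theorem modify_modify (out : List (List Int)) (r : Nat) (f g : List Int → List Int) :
    (out.modify r f).modify r g = out.modify r (fun row => g (f row)) := by
  apply List.ext_getElem
  · simp
  · intro i h1 h2
    rw [List.getElem_modify, List.getElem_modify, List.getElem_modify]
    split <;> rfl

-- push the per-cell conditional modify out of the inner fold
theorem inner_push_modify (l : List Nat) (P : Nat → Bool) (r : Nat) (out : List (List Int)) :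
    l.foldl (fun out c => if P c then out.modify r (fun row => row.set c 8) else out) out
      = out.modify r (fun row => l.foldl (fun row c => if P c then row.set c 8 else row) row) := by
  induction l generalizing out with
  | nil => simp [modify_id]
  | cons c t ih =>
      simp only [List.foldl_cons]
      by_cases h : P c = true
      · simp only [h, if_true]
        rw [ih, modify_modify]
      · simp [h, ih]

-- A's core computation, row by row, is the per-cell map
theorem A_core (rows cols : Nat) :
    (List.range rows).foldl (fun out r =>
      (List.range cols).foldl (fun out c =>
        if r == 0 || r == rows - 1 || c == 0 || c == cols - 1 then
          out.modify r (fun row => row.set c 8)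
        else out) out)
      (List.replicate rows (List.replicate cols (0 : Int)))
    = (List.range rows).map (fun r =>
        (List.range cols).map (fun c =>
          if r == 0 || r == rows - 1 || c == 0 || c == cols - 1
          then (8 : Int) else 0)) := by
  have hfun : (fun (out : List (List Int)) (r : Nat) =>
      (List.range cols).foldl (fun out c =>
        if r == 0 || r == rows - 1 || c == 0 || c == cols - 1 then
          out.modify r (fun row => row.set c 8)
        else out) out)
    = (fun out r => out.modify r (fun row =>
        (List.range cols).foldl (fun row c =>
          if r == 0 || r == rows - 1 || c == 0 || c == cols - 1 then row.set c 8 else row) row)) := by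
    funext out r
    exact inner_push_modify (List.range cols)
      (fun c => r == 0 || r == rows - 1 || c == 0 || c == cols - 1) r out
  rw [hfun]
  apply List.ext_getElem
  · rw [foldl_modify_length]; simp
  · intro i h1 h2
    have hi : i < rows := by simpa using h2
    rw [foldl_modify_getElem _ List.nodup_range _ _ i (by simpa using hi)]
    simp only [List.mem_range, hi, if_true]
    rw [List.getElem_replicate, List.getElem_map, List.getElem_range]
    apply List.ext_getElem
    · rw [foldl_set_length]; simp
    · intro j hj1 hj2
      have hjc : j < cols := by
        have := hj1; rw [foldl_set_length] at this; simpa using this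
      rw [foldl_set_getElem _ _ _ j (by simpa using hjc)]
      simp [List.mem_range, hjc]

theorem solveA_eq_map (grid : List (List Int)) :
    solve_6f8cd79b grid =
      (List.range grid.length).map (fun r =>
        (List.range (grid.headD []).length).map (fun c =>
          if r == 0 || r == grid.length - 1 || c == 0 || c == (grid.headD []).length - 1
          then (8 : Int) else 0)) := by
  unfold solve_6f8cd79b
  exact A_core grid.length (grid.headD []).length

-- B's middle row equals the per-cell map for the non-border condition
theorem mid_eq_map (cols : Nat) :
    ((if cols ≥ 1 then [(8 : Int)] else []) ++ List.replicate (cols - 2) (0 : Int)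
       ++ (if cols ≥ 2 then [(8 : Int)] else []))
    = (List.range cols).map (fun c => if c == 0 || c == cols - 1 then (8 : Int) else 0) := by
  match cols with
  | 0 => simp
  | 1 => simp [List.range_succ]
  | (n + 2) =>
      have h1 : n + 2 ≥ 1 := by omega
      have h2 : n + 2 ≥ 2 := by omega
      simp only [if_pos h1, if_pos h2, Nat.add_sub_cancel]
      apply List.ext_getElem
      · simp
      · intro i hi1 hi2
        have hic : i < n + 2 := by simpa using hi2
        rw [List.getElem_map, List.getElem_range]
        rcases Nat.lt_trichotomy i (n + 1) with h | h | h
        · rcases Nat.eq_zero_or_pos i with h0 | h0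
          · subst h0; simp
          · have : i = 0 ∨ (i ≠ 0 ∧ i ≠ n + 1) := Or.inr ⟨by omega, by omega⟩
            have hne0 : (i == 0) = false := by simp; omega
            have hne1 : (i == n + 2 - 1) = false := by simp; omega
            rw [List.getElem_append_left (by simp; omega)]
            rw [List.getElem_append_right (by simp; omega)]
            simp [hne0]
            omega
        · subst h
          rw [List.getElem_append_right (by simp)]
          simp
        · omega

theorem full_eq_map (cols : Nat) :
    List.replicate cols (8 : Int) = (List.range cols).map (fun _ => (8 : Int)) := by
  apply List.ext_getElem <;> simp

-- ===== VERDICT (by name: the statement is the Claim_ definition above) =====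
theorem solve_6f8cd79b_spec : Claim_equal_solve_6f8cd79b := by
  intro grid _ _
  unfold Spec_solve_6f8cd79b solve_6f8cd79b_alt
  rw [solveA_eq_map]
  set rows := grid.length
  set cols := (grid.headD []).length
  apply List.ext_getElem
  · simp
  · intro i h1 h2
    have hi : i < rows := by simpa using h1
    simp only [List.getElem_map, List.getElem_range]
    by_cases hb : (i == 0 || i == rows - 1) = true
    · rw [if_pos hb, full_eq_map]
      apply List.map_congr_left
      intro c _
      simp only [hb, Bool.true_or]
      rw [Bool.or_comm] at hb
      simp
    · rw [if_neg hb, mid_eq_map]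
      apply List.map_congr_left
      intro c _
      simp only [Bool.or_eq_true, beq_iff_eq] at hb ⊢
      by_cases hc : c = 0 ∨ c = cols - 1 <;> simp [hc]
      · tauto
      · tauto
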